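-- pv_equiv track=rewrite | github.com/ianhaggerty3/AoC-2023 | day13/day13.py | detect_horizontal_reflection
-- ===== SOURCE A (Python) =====
-- def detect_horizontal_reflection(block):
--     for possible in range(1, len(block)):
--         count = min(possible, len(block) - possible)
--         top = ''.join(block[possible-count:possible])
--         bottom = ''.join(reversed(block[possible:possible+count]))
--         if top == bottom:
--             return possible
--
--     return 0
-- ===== SOURCE B (Python) =====
-- def detect_horizontal_reflection(block):
--     # Concatenate the rows once (forward, and in reverse row order) and record
--     # cumulative row offsets, so each candidate mirror line is tested by a single
--     # slice comparison on the precomputed strings instead of re-joining rows.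
--     offs = [0]
--     for row in block:
--         offs.append(offs[-1] + len(row))
--     fwd = ''.join(block)
--     rev = ''.join(reversed(block))
--     total = len(fwd)
--     n = len(block)
--     for p in range(1, n):
--         count = min(p, n - p)
--         if fwd[offs[p - count]:offs[p]] == rev[total - offs[p + count]:total - offs[p]]:
--             return p
--     return 0
-- ===== Notes on version B (the rewrite author's own statement) =====
-- stated objective: faster
-- what changed: B concatenates the rows once into forward and row-order-reversed strings with an O(n) cumulative offset table, then tests each candidate mirror line by one slice comparison on those precomputed strings, instead of A's per-candidate list slicing, row reversal and fresh string joins.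
import Mathlib
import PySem

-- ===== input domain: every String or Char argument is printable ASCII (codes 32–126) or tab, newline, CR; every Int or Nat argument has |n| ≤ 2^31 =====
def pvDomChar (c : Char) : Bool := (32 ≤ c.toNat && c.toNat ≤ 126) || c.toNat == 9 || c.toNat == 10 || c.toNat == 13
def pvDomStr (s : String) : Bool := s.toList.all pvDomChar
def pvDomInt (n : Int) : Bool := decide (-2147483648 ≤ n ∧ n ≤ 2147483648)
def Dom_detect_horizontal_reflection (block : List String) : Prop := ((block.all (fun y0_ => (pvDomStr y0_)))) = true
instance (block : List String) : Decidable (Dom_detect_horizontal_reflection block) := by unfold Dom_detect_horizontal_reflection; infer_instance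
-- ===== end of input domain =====

-- B concatenates the rows once (forward and row-reversed) with an O(n) offset table and tests each
-- mirror candidate by a single slice comparison on the precomputed strings; same values as A.


-- ===== PORT A =====
def pvGoA (block : List String) (n : Int) : List Int → Int
  | [] => 0
  | p :: rest =>
      let count := min p (n - p)
      let top := PySem.Str.join "" (PySem.List.slice block (some (p - count)) (some p))
      let bottom := PySem.Str.join "" (PySem.List.slice block (some p) (some (p + count))).reverse
      if top == bottom then p else pvGoA block n rest

def detect_horizontal_reflection (block : List String) : Int :=
  pvGoA block (block.length : Int) (PySem.List.pyRange 1 (block.length : Int) 1)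

-- ===== PORT B =====
def pvGoB (offs : List Int) (fwd rev : String) (total n : Int) : List Int → Int
  | [] => 0
  | p :: rest =>
      let count := min p (n - p)
      if PySem.Str.slice fwd (some (PySem.List.pyGetD offs (p - count) 0))
                             (some (PySem.List.pyGetD offs p 0)) ==
         PySem.Str.slice rev (some (total - PySem.List.pyGetD offs (p + count) 0))
                             (some (total - PySem.List.pyGetD offs p 0))
      then p else pvGoB offs fwd rev total n rest

def detect_horizontal_reflection_alt (block : List String) : Int :=
  let offs : List Int := block.foldl
    (fun offs row => offs ++ [PySem.List.pyGetD offs (-1) 0 + PySem.Str.len row]) [0]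
  let fwd : String := PySem.Str.join "" block
  let rev : String := PySem.Str.join "" block.reverse
  let total : Int := PySem.Str.len fwd
  let n : Int := (block.length : Int)
  pvGoB offs fwd rev total n (PySem.List.pyRange 1 n 1)

-- ===== PRECONDITION & SPEC =====
def Spec_detect_horizontal_reflection (block : List String) (out : Int) : Prop := out = detect_horizontal_reflection_alt block
instance (block : List String) (out : Int) : Decidable (Spec_detect_horizontal_reflection block out) := by unfold Spec_detect_horizontal_reflection; infer_instance

-- ===== CLAIM (what is proved, stated in full; the proofs are below) =====
def Claim_equal_detect_horizontal_reflection : Prop := ∀ (block : List String), Dom_detect_horizontal_reflection block → Spec_detect_horizontal_reflection block (detect_horizontal_reflection block)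

-- ===== LEMMAS AND PROOFS =====

-- the per-candidate test of port A, as a named predicate
def pvCondA (block : List String) (n p : Int) : Bool :=
  let count := min p (n - p)
  PySem.Str.join "" (PySem.List.slice block (some (p - count)) (some p)) ==
  PySem.Str.join "" (PySem.List.slice block (some p) (some (p + count))).reverse

-- port B's offset table, as a named value
def pvOffs (block : List String) : List Int :=
  block.foldl
    (fun offs row => offs ++ [PySem.List.pyGetD offs (-1) 0 + PySem.Str.len row]) [0]

-- the per-candidate test of port B, as a named predicate
def pvCondB (block : List String) (p : Int) : Bool :=
  let n : Int := (block.length : Int)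
  let count := min p (n - p)
  let total := PySem.Str.len (PySem.Str.join "" block)
  PySem.Str.slice (PySem.Str.join "" block)
      (some (PySem.List.pyGetD (pvOffs block) (p - count) 0))
      (some (PySem.List.pyGetD (pvOffs block) p 0)) ==
  PySem.Str.slice (PySem.Str.join "" block.reverse)
      (some (total - PySem.List.pyGetD (pvOffs block) (p + count) 0))
      (some (total - PySem.List.pyGetD (pvOffs block) p 0))

-- prefix character count of the first k rows
def pvPre (rows : List (List Char)) (k : Nat) : Nat := ((rows.take k).map List.length).sum

lemma pvJoinNil (ps : List (List Char)) : PySem.Chars.join [] ps = ps.flatten := by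
  simp [PySem.Chars.join, List.intercalate]
  induction ps with
  | nil => rfl
  | cons h t ih => cases t with
    | nil => simp
    | cons a b => simp_all [List.intersperse]

lemma pvBeqStr (s t : String) : (s == t) = (s.toList == t.toList) := by
  rw [Bool.eq_iff_iff, beq_iff_eq, beq_iff_eq]
  exact ⟨fun h => by rw [h], fun h => String.toList_inj.mp h⟩

lemma pvSumCast (l : List Nat) : (List.map (fun x : Nat => (x : Int)) l).sum = ((l.sum : Nat) : Int) := by
  induction l with
  | nil => rfl
  | cons h t ih => rw [List.map_cons, List.sum_cons, List.sum_cons, ih]; push_cast; ring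

lemma pvPre_len (rows : List (List Char)) (k : Nat) :
    ((rows.take k).flatten).length = pvPre rows k := by
  simp [pvPre, List.length_flatten]

lemma pvPre_split (rows : List (List Char)) {a m : Nat} (h : a ≤ m) :
    pvPre rows m = pvPre rows a + (((rows.drop a).take (m - a)).map List.length).sum := by
  unfold pvPre
  conv_lhs => rw [show m = a + (m - a) by omega, List.take_add, List.map_append, List.sum_append]

lemma pvPre_total (rows : List (List Char)) {k : Nat} (h : k ≤ rows.length) :
    pvPre rows k + ((rows.drop k).map List.length).sum = pvPre rows rows.length := by
  rw [pvPre_split rows h]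
  rw [List.take_of_length_le (by simp)]

lemma pvPre_rev (rows : List (List Char)) {k : Nat} (hk : k ≤ rows.length) :
    pvPre rows.reverse (rows.length - k) = pvPre rows rows.length - pvPre rows k := by
  unfold pvPre
  rw [List.take_reverse, Nat.sub_sub_self hk, List.map_reverse, List.sum_reverse, List.take_length]
  have := pvPre_total rows hk
  unfold pvPre at this
  rw [List.take_length] at this
  omega

lemma pvSliceFlatten (rows : List (List Char)) {a m : Nat} (ham : a ≤ m) :
    ((rows.flatten).drop (pvPre rows a)).take (pvPre rows m - pvPre rows a)
      = ((rows.drop a).take (m - a)).flatten := by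
  have hsplit : rows.flatten = (rows.take a).flatten ++ (rows.drop a).flatten := by
    rw [← List.flatten_append, List.take_append_drop]
  rw [hsplit, ← pvPre_len rows a, List.drop_left]
  have h2 : pvPre rows m - pvPre rows a
      = (((rows.drop a).take (m - a)).flatten).length := by
    rw [pvPre_split rows ham, List.length_flatten]; omega
  have hsplit2 : (rows.drop a).flatten
      = ((rows.drop a).take (m - a)).flatten ++ ((rows.drop a).drop (m - a)).flatten := by
    rw [← List.flatten_append, List.take_append_drop]
  rw [pvPre_len rows a, h2, hsplit2, List.take_left]

lemma pvRevDropTake (rows : List (List Char)) {q c : Nat} (h : q + c ≤ rows.length) :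
    (rows.reverse.drop (rows.length - (q + c))).take c = ((rows.drop q).take c).reverse := by
  rw [List.drop_reverse, Nat.sub_sub_self h, List.take_reverse, List.length_take]
  rw [show min (q + c) rows.length - c = q by omega, List.drop_take]
  rw [show q + c - q = c from by omega]

-- the two first-match scans agree when the per-candidate tests agree on the range
lemma pvGo_congr (block : List String) (n : Int) (l : List Int)
    (h : ∀ p ∈ l, pvCondA block n p = pvCondB block p) :
    pvGoA block n l
      = pvGoB (pvOffs block) (PySem.Str.join "" block) (PySem.Str.join "" block.reverse)
          (PySem.Str.len (PySem.Str.join "" block)) (block.length : Int) l := by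
  induction l with
  | nil => rfl
  | cons p rest ih =>
      have hA : pvGoA block n (p :: rest)
          = if pvCondA block n p then p else pvGoA block n rest := rfl
      rw [hA]
      have hB : pvGoB (pvOffs block) (PySem.Str.join "" block) (PySem.Str.join "" block.reverse)
            (PySem.Str.len (PySem.Str.join "" block)) (block.length : Int) (p :: rest)
          = if pvCondB block p then p
            else pvGoB (pvOffs block) (PySem.Str.join "" block) (PySem.Str.join "" block.reverse)
                  (PySem.Str.len (PySem.Str.join "" block)) (block.length : Int) rest := rfl
      rw [hB, h p (by simp), ih (fun q hq => h q (by simp [hq]))]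

-- running character totals of the rows of l, starting from s (the offset loop of Source B)
def pvScan (s : Int) : List String → List Int
  | [] => []
  | r :: t => (s + PySem.Str.len r) :: pvScan (s + PySem.Str.len r) t

lemma pvFoldScan (l : List String) : ∀ (ys : List Int) (h : ys ≠ []),
    l.foldl (fun offs row => offs ++ [PySem.List.pyGetD offs (-1) 0 + PySem.Str.len row]) ys
      = ys ++ pvScan (ys.getLast h) l := by
  induction l with
  | nil => intro ys h; simp [pvScan]
  | cons r t ih =>
      intro ys h
      simp only [List.foldl_cons]
      rw [PySem.List.pyGetD_neg_one ys 0 h]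
      rw [ih (ys ++ [ys.getLast h + PySem.Str.len r]) (by simp)]
      rw [List.getLast_concat]
      simp [pvScan, List.append_assoc]

lemma pvScan_getElem? (l : List String) : ∀ (s : Int) (k : Nat), k < l.length →
    (pvScan s l)[k]? = some (s + ((l.take (k + 1)).map (fun row => PySem.Str.len row)).sum) := by
  induction l with
  | nil => intro s k hk; simp at hk
  | cons r t ih =>
      intro s k hk
      cases k with
      | zero => simp [pvScan]
      | succ j =>
          rw [show pvScan s (r :: t) = (s + PySem.Str.len r) :: pvScan (s + PySem.Str.len r) t from rfl]
          rw [List.getElem?_cons_succ, ih _ j (by simpa using hk)]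
          simp [List.sum_cons]
          ring

lemma pvSumLen (l : List String) (m : Nat) :
    ((l.take m).map (fun row => PySem.Str.len row)).sum
      = ((pvPre (l.map String.toList) m : Nat) : Int) := by
  simp only [PySem.Str.len_eq, pvPre, ← List.map_take, List.map_map]
  rw [← pvSumCast, List.map_map]
  rfl

lemma pvOffs_get (block : List String) {i : Int} (h0 : 0 ≤ i) (hi : i ≤ (block.length : Int)) :
    PySem.List.pyGetD (pvOffs block) i 0 = ((pvPre (block.map String.toList) i.toNat : Nat) : Int) := by
  unfold pvOffs
  rw [pvFoldScan block [0] (by simp), show ([0] : List Int).getLast (by simp) = 0 from rfl]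
  rw [show i = ((i.toNat : Nat) : Int) from (Int.toNat_of_nonneg h0).symm,
      PySem.List.pyGetD_natCast]
  cases hk : i.toNat with
  | zero => simp [pvPre]
  | succ j =>
      have hj : j < block.length := by omega
      rw [List.getD, List.getElem?_append_right (by simp)]
      simp only [List.length_cons, List.length_nil, Nat.add_sub_cancel]
      rw [pvScan_getElem? block 0 j hj, Option.getD_some, zero_add,
          pvSumLen block (j + 1), Int.toNat_natCast]

lemma pvJoinList (l : List String) :
    (PySem.Str.join "" l).toList = (l.map String.toList).flatten := by
  rw [PySem.Str.toList_join, show ("".toList : List Char) = [] from by simp, pvJoinNil]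

lemma pvTotalLen (block : List String) :
    PySem.Str.len (PySem.Str.join "" block)
      = ((pvPre (block.map String.toList) (block.map String.toList).length : Nat) : Int) := by
  rw [PySem.Str.len_eq, pvJoinList]
  simp [List.length_flatten, pvPre]
  rw [List.take_of_length_le (by simp)]

lemma pvCondAux (block : List String) (q c : Nat) (hcq : c ≤ q) (hqc : q + c ≤ block.length) :
    (PySem.Str.join "" (PySem.List.slice block (some ((q - c : Nat) : Int)) (some ((q : Nat) : Int))) ==
     PySem.Str.join "" (PySem.List.slice block (some ((q : Nat) : Int)) (some ((q + c : Nat) : Int))).reverse)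
    = (PySem.Str.slice (PySem.Str.join "" block)
         (some (PySem.List.pyGetD (pvOffs block) ((q - c : Nat) : Int) 0))
         (some (PySem.List.pyGetD (pvOffs block) ((q : Nat) : Int) 0)) ==
       PySem.Str.slice (PySem.Str.join "" block.reverse)
         (some (PySem.Str.len (PySem.Str.join "" block) -
                PySem.List.pyGetD (pvOffs block) ((q + c : Nat) : Int) 0))
         (some (PySem.Str.len (PySem.Str.join "" block) -
                PySem.List.pyGetD (pvOffs block) ((q : Nat) : Int) 0))) := by
  have hrl : (block.map String.toList).length = block.length := by simp
  set rows := block.map String.toList with hrows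
  have hN : q + c ≤ rows.length := by omega
  rw [pvOffs_get block (by positivity) (by exact_mod_cast Nat.le_of_lt_succ (by omega))]
  rw [pvOffs_get block (by positivity) (by exact_mod_cast (by omega : q ≤ block.length))]
  rw [pvOffs_get block (by positivity) (by exact_mod_cast hqc)]
  rw [pvTotalLen block]
  simp only [Int.toNat_natCast, ← hrows]
  -- monotonicity facts about the offsets
  have hs1 := pvPre_split rows (show q - c ≤ q by omega)
  have hs1b := pvPre_split rows (show q ≤ q + c by omega)
  have hs2 := pvPre_total rows hN
  -- both sides as character-list equalities
  rw [pvBeqStr, pvBeqStr]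
  rw [PySem.List.slice_natCast, PySem.List.slice_natCast]
  rw [pvJoinList, pvJoinList]
  rw [PySem.Str.toList_slice, PySem.Str.toList_slice,
      PySem.Chars.slice_eq_listSlice, PySem.Chars.slice_eq_listSlice]
  rw [pvJoinList, pvJoinList]
  simp only [List.map_take, List.map_drop, List.map_reverse, ← hrows]
  set L := pvPre rows rows.length with hL
  rw [show (L : Int) - ((pvPre rows (q + c) : Nat) : Int) = (((L - pvPre rows (q + c)) : Nat) : Int) from by omega,
      show (L : Int) - ((pvPre rows q : Nat) : Int) = (((L - pvPre rows q) : Nat) : Int) from by omega]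
  rw [PySem.List.slice_natCast, PySem.List.slice_natCast]
  rw [pvSliceFlatten rows (show q - c ≤ q by omega)]
  rw [show L - pvPre rows (q + c) = pvPre rows.reverse (rows.length - (q + c)) from by
        rw [pvPre_rev rows hN]]
  rw [show L - pvPre rows q - pvPre rows.reverse (rows.length - (q + c))
        = pvPre rows.reverse (rows.length - q) - pvPre rows.reverse (rows.length - (q + c)) from by
        rw [pvPre_rev rows hN, pvPre_rev rows (show q ≤ rows.length by omega)]]
  rw [pvSliceFlatten rows.reverse (show rows.length - (q + c) ≤ rows.length - q by omega)]
  rw [show rows.length - q - (rows.length - (q + c)) = c from by omega]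
  rw [pvRevDropTake rows hN]
  rw [show q + c - q = c from by omega]

lemma pvCond_eq (block : List String) {p : Int} (h1 : 1 ≤ p)
    (h2 : p < (block.length : Int)) :
    pvCondA block (block.length : Int) p = pvCondB block p := by
  simp only [pvCondA, pvCondB]
  have hcnt0 : 0 ≤ min p ((block.length : Int) - p) := by omega
  have hp : p = ((p.toNat : Nat) : Int) := (Int.toNat_of_nonneg (by omega)).symm
  have hc : min p ((block.length : Int) - p) = (((min p ((block.length : Int) - p)).toNat : Nat) : Int) :=
    (Int.toNat_of_nonneg hcnt0).symm
  set q : Nat := p.toNat with hq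
  set c : Nat := (min p ((block.length : Int) - p)).toNat with hcn
  have hcq : c ≤ q := by omega
  have hqc : q + c ≤ block.length := by omega
  rw [show p - min p ((block.length : Int) - p) = ((q - c : Nat) : Int) from by omega,
      show p + min p ((block.length : Int) - p) = ((q + c : Nat) : Int) from by omega,
      hp]
  exact pvCondAux block q c hcq hqc

-- ===== VERDICT (by name: the statement is the Claim_ definition above) =====
theorem detect_horizontal_reflection_spec : Claim_equal_detect_horizontal_reflection := by
  intro block _
  unfold Spec_detect_horizontal_reflection
  show pvGoA block (block.length : Int) (PySem.List.pyRange 1 (block.length : Int) 1)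
      = detect_horizontal_reflection_alt block
  have hB : detect_horizontal_reflection_alt block
      = pvGoB (pvOffs block) (PySem.Str.join "" block) (PySem.Str.join "" block.reverse)
          (PySem.Str.len (PySem.Str.join "" block)) (block.length : Int)
          (PySem.List.pyRange 1 (block.length : Int) 1) := rfl
  rw [hB]
  apply pvGo_congr
  intro p hp
  rw [PySem.List.mem_pyRange_one] at hp
  exact pvCond_eq block hp.1 hp.2
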